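-- pv_equiv track=rewrite | github.com/GundalaNikhil/DSA | dsa-problems/Heaps/solutions/python/HEP-005-meeting-rooms-min-idle-setup.py | min_total_slack
-- ===== SOURCE A (Python) =====
-- from bisect import bisect_right
--
-- def min_total_slack(meetings: list, k: int, s: int) -> int:
--     meetings.sort(key=lambda x: x[0])
--     unused = k
--
--     # Coordinate-compress possible free times (end + s).
--     coords = sorted({end + s for _, end in meetings})
--     rank = {val: i for i, val in enumerate(coords)}
--     n = len(coords)
--     tree = [0] * (4 * n)
--
--     def update(node, left, right, idx, delta):
--         if left == right:
--             tree[node] += delta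
--             return
--         mid = (left + right) // 2
--         if idx <= mid:
--             update(node * 2, left, mid, idx, delta)
--         else:
--             update(node * 2 + 1, mid + 1, right, idx, delta)
--         tree[node] = tree[node * 2] + tree[node * 2 + 1]
--
--     def query_rightmost(node, left, right, r_limit):
--         if left > r_limit or tree[node] == 0:
--             return -1
--         if left == right:
--             return left
--         mid = (left + right) // 2
--         res = query_rightmost(node * 2 + 1, mid + 1, right, r_limit)
--         if res != -1:
--             return res
--         return query_rightmost(node * 2, left, mid, r_limit)
--
--     total_slack = 0
--     for start, end in meetings:
--         idx = bisect_right(coords, start) - 1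
--         best_rank = -1
--         if idx >= 0:
--             best_rank = query_rightmost(1, 0, n - 1, idx)
--
--         if best_rank != -1:
--             free_time = coords[best_rank]
--             total_slack += start - free_time
--             update(1, 0, n - 1, best_rank, -1)
--         else:
--             # Use a fresh room; first meeting in a room has 0 slack.
--             unused -= 1
--
--         update(1, 0, n - 1, rank[end + s], 1)
--
--     return total_slack
-- ===== SOURCE B (Python) =====
-- def min_total_slack(meetings: list, k: int, s: int) -> int:
--     meetings.sort(key=lambda x: x[0])
--     # Lazy-transfer two-bucket scheme: free-times start in `pending`; once a
--     # free-time is <= the current (nondecreasing) start it is moved to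
--     # `eligible` and stays usable forever.  No ordered container, no bisect:
--     # reuse takes max(eligible).
--     pending = []
--     eligible = []
--     unused = k
--     total_slack = 0
--     for start, end in meetings:
--         still = []
--         for f in pending:
--             if f <= start:
--                 eligible.append(f)
--             else:
--                 still.append(f)
--         pending = still
--         if eligible:
--             best = max(eligible)
--             eligible.remove(best)
--             total_slack += start - best
--         else:
--             unused -= 1
--         pending.append(end + s)
--     return total_slack
-- ===== Notes on version B (the rewrite author's own statement) =====
-- stated objective: alternative
-- what changed: Replaces A's coordinate compression, rank dictionary and recursive segment tree with a lazy-transfer two-bucket scheme: free-times wait in an unordered `pending` bucket and, because the sorted starts are nondecreasing, are moved once and for all into an `eligible` bucket when they become <= the current start; reuse then just takes max(eligible) and removes it - no ordered container, no bisect, no tree.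
import Mathlib
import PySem

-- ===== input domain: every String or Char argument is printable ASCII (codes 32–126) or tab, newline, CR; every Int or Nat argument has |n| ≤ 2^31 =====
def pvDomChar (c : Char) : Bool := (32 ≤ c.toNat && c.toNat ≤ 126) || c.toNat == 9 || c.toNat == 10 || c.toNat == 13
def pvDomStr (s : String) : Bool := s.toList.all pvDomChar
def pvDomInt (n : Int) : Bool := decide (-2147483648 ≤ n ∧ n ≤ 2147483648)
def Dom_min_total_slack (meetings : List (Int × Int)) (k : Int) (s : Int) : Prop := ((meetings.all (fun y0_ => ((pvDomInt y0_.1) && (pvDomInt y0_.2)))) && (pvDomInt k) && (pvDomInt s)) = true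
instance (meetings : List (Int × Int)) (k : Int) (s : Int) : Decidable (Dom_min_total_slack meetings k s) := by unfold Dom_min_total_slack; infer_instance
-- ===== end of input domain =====

-- B replaces A's coordinate-compressed segment tree by a lazy-transfer two-bucket
-- scheme (unordered pending/eligible lists, reuse = max(eligible)) — alternative.
-- Equality proved is about the RETURN value; both Pythons perform the same in-place
-- sort of `meetings` as their first step.

-- ===== PORT A =====
-- pvUpdate / pvQuery are A's two recursive segment-tree helpers (tree threaded functionally).
-- Their `r ≤ l` base tests replace Python's `left == right` only to make the recursion
-- visibly terminating; on every call the ports make (l ≤ r throughout) the two agree.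
-- fuel = interval length; always sufficient at the call sites (fuel 0 is unreachable)
def pvUpdateGo (fuel : Nat) (t : List Int) (node l r idx : Nat) (delta : Int) : List Int :=
  match fuel with
  | 0 => t
  | fuel+1 =>
    if r ≤ l then
      t.set node (t.getD node 0 + delta)
    else
      let mid := (l + r) / 2
      let t' := if idx ≤ mid then pvUpdateGo fuel t (2*node) l mid idx delta
                else pvUpdateGo fuel t (2*node+1) (mid+1) r idx delta
      t'.set node (t'.getD (2*node) 0 + t'.getD (2*node+1) 0)

def pvUpdate (t : List Int) (node l r idx : Nat) (delta : Int) : List Int :=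
  pvUpdateGo (r - l + 1) t node l r idx delta

def pvQueryGo (fuel : Nat) (t : List Int) (node l r rlimit : Nat) : Int :=
  match fuel with
  | 0 => -1
  | fuel+1 =>
    if l > rlimit ∨ t.getD node 0 = 0 then -1
    else if r ≤ l then (l : Int)
    else
      let mid := (l + r) / 2
      let res := pvQueryGo fuel t (2*node+1) (mid+1) r rlimit
      if res ≠ -1 then res else pvQueryGo fuel t (2*node) l mid rlimit

def pvQuery (t : List Int) (node l r rlimit : Nat) : Int :=
  pvQueryGo (r - l + 1) t node l r rlimit

def min_total_slack (meetings : List (Int × Int)) (k : Int) (s : Int) : Int :=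
  let ms := PySem.List.sorted meetings (fun x => x.1)
  let coords := PySem.List.sorted (PySem.Set.ofList (ms.map (fun p => p.2 + s))) (fun v => v)
  let rank : PySem.Dict Int Int := PySem.Dict.ofList ((PySem.List.enumerate coords).map (fun p => (p.2, p.1)))
  let n := coords.length
  let st := ms.foldl (fun (acc : List Int × Int × Int) m =>
      let idx : Int := (PySem.List.bisectRight coords m.1 : Int) - 1
      let best_rank : Int := if 0 ≤ idx then pvQuery acc.1 1 0 (n-1) idx.toNat else -1
      let acc2 : List Int × Int × Int :=
        if best_rank ≠ -1 then
          (pvUpdate acc.1 1 0 (n-1) best_rank.toNat (-1),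
           acc.2.1 + (m.1 - PySem.List.pyGetD coords best_rank 0), acc.2.2)
        else (acc.1, acc.2.1, acc.2.2 - 1)
      (pvUpdate acc2.1 1 0 (n-1) (PySem.Dict.getD rank (m.2 + s) 0).toNat 1, acc2.2.1, acc2.2.2))
    (List.replicate (4*n) (0:Int), 0, k)
  st.2.1

-- ===== PORT B =====
-- state = (pending, eligible, total_slack, unused); the inner for-loop over `pending`
-- (append to eligible or to still) is the foldl over acc.1; max(...) and .remove(...)
-- are PySem.List.max?/remove? (guarded by `if eligible:`, the none branches are unreachable)
def min_total_slack_alt (meetings : List (Int × Int)) (k : Int) (s : Int) : Int :=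
  let ms := PySem.List.sorted meetings (fun x => x.1)
  let st := ms.foldl (fun (acc : List Int × List Int × Int × Int) m =>
      let tr := acc.1.foldl (fun (pr : List Int × List Int) f =>
          if f ≤ m.1 then (pr.1 ++ [f], pr.2) else (pr.1, pr.2 ++ [f])) (acc.2.1, ([] : List Int))
      let acc2 : List Int × Int × Int :=
        if tr.1 ≠ [] then
          match PySem.List.max? tr.1 (fun y => y) with
          | some best =>
            match PySem.List.remove? tr.1 best with
            | some e2 => (e2, acc.2.2.1 + (m.1 - best), acc.2.2.2)
            | none => (tr.1, acc.2.2.1, acc.2.2.2)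
          | none => (tr.1, acc.2.2.1, acc.2.2.2)
        else (tr.1, acc.2.2.1, acc.2.2.2 - 1)
      (tr.2 ++ [m.2 + s], acc2.1, acc2.2.1, acc2.2.2))
    (([] : List Int), ([] : List Int), (0 : Int), k)
  st.2.2.1

-- ===== PRECONDITION & SPEC =====
def Spec_min_total_slack (meetings : List (Int × Int)) (k : Int) (s : Int) (out : Int) : Prop := out = min_total_slack_alt meetings k s
instance (meetings : List (Int × Int)) (k : Int) (s : Int) (out : Int) : Decidable (Spec_min_total_slack meetings k s out) := by unfold Spec_min_total_slack; infer_instance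

-- ===== CLAIM (what is proved, stated in full; the proofs are below) =====
def Claim_equal_min_total_slack : Prop := ∀ (meetings : List (Int × Int)) (k : Int) (s : Int), Dom_min_total_slack meetings k s → Spec_min_total_slack meetings k s (min_total_slack meetings k s)

-- ===== LEMMAS AND PROOFS =====
def pvSum (c : Nat → Int) (l r : Nat) : Int := ∑ p ∈ Finset.Icc l r, c p

def SegInv (t : List Int) (node l r : Nat) (c : Nat → Int) : Prop :=
  if r ≤ l then t.getD node 0 = c l
  else t.getD node 0 = pvSum c l r ∧
       SegInv t (2*node) l ((l+r)/2) c ∧ SegInv t (2*node+1) ((l+r)/2+1) r c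
termination_by r - l
decreasing_by all_goals omega

def isDesc (a j : Nat) : Prop := ∃ m, j / 2^m = a

theorem getD_set_lt (t : List Int) (i j : Nat) (v : Int) (h : i < t.length) :
    (t.set i v).getD j 0 = if j = i then v else t.getD j 0 := by
  by_cases hij : j = i
  · subst hij; simp [List.getD, h]
  · simp [List.getD, Ne.symm hij, hij]

theorem isDesc_self (a : Nat) : isDesc a a := ⟨0, by simp⟩

theorem isDesc_le (a j : Nat) (h : isDesc a j) : a ≤ j := by
  obtain ⟨m, hm⟩ := h; subst hm; exact Nat.div_le_self _ _

theorem isDesc_left (a j : Nat) (h : isDesc (2*a) j) : isDesc a j := by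
  obtain ⟨m, hm⟩ := h
  exact ⟨m+1, by rw [pow_succ, ← Nat.div_div_eq_div_mul, hm]; omega⟩

theorem isDesc_right (a j : Nat) (h : isDesc (2*a+1) j) : isDesc a j := by
  obtain ⟨m, hm⟩ := h
  exact ⟨m+1, by rw [pow_succ, ← Nat.div_div_eq_div_mul, hm]; omega⟩

theorem isDesc_sib (a j : Nat) (ha : 1 ≤ a) (h1 : isDesc (2*a) j) (h2 : isDesc (2*a+1) j) : False := by
  obtain ⟨m, hm⟩ := h1
  obtain ⟨m', hm'⟩ := h2
  rcases Nat.le_total m m' with h | h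
  · have he : m + (m' - m) = m' := by omega
    have hthis : j / 2^m' = (j / 2^m) / 2^(m'-m) := by
      rw [Nat.div_div_eq_div_mul, ← pow_add, he]
    rw [hm, hm'] at hthis
    by_cases heq : m' = m
    · subst heq; simp only [Nat.sub_self, pow_zero, Nat.div_one] at hthis; omega
    · have h1' : (2*a) / 2^(m'-m) ≤ (2*a) / 2 :=
        Nat.div_le_div_left (by
          calc (2:Nat) = 2^1 := rfl
            _ ≤ 2^(m'-m) := Nat.pow_le_pow_right (by omega) (by omega)) (by omega)
      have h2' : (2*a) / 2 = a := by omega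
      omega
  · have he : m' + (m - m') = m := by omega
    have hthis : j / 2^m = (j / 2^m') / 2^(m-m') := by
      rw [Nat.div_div_eq_div_mul, ← pow_add, he]
    rw [hm, hm'] at hthis
    by_cases heq : m = m'
    · subst heq; simp only [Nat.sub_self, pow_zero, Nat.div_one] at hthis; omega
    · have h1' : (2*a+1) / 2^(m-m') ≤ (2*a+1) / 2 :=
        Nat.div_le_div_left (by
          calc (2:Nat) = 2^1 := rfl
            _ ≤ 2^(m-m') := Nat.pow_le_pow_right (by omega) (by omega)) (by omega)
      have h2' : (2*a+1) / 2 = a := by omega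
      omega

theorem SegInv_congr_t (t t' : List Int) (node l r : Nat) (c : Nat → Int)
    (h : ∀ j, isDesc node j → t.getD j 0 = t'.getD j 0) (hs : SegInv t node l r c) :
    SegInv t' node l r c := by
  rw [SegInv] at hs ⊢
  by_cases hrl : r ≤ l
  · simp only [if_pos hrl] at hs ⊢
    rw [← h node (isDesc_self node)]; exact hs
  · simp only [if_neg hrl] at hs ⊢
    refine ⟨?_, ?_, ?_⟩
    · rw [← h node (isDesc_self node)]; exact hs.1
    · exact SegInv_congr_t t t' (2*node) l ((l+r)/2) c
        (fun j hj => h j (isDesc_left node j hj)) hs.2.1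
    · exact SegInv_congr_t t t' (2*node+1) ((l+r)/2+1) r c
        (fun j hj => h j (isDesc_right node j hj)) hs.2.2
termination_by r - l
decreasing_by all_goals omega

theorem SegInv_congr_c (t : List Int) (node l r : Nat) (c c' : Nat → Int) (hlr : l ≤ r)
    (h : ∀ p, l ≤ p → p ≤ r → c p = c' p) (hs : SegInv t node l r c) :
    SegInv t node l r c' := by
  rw [SegInv] at hs ⊢
  by_cases hrl : r ≤ l
  · simp only [if_pos hrl] at hs ⊢
    rw [← h l le_rfl hlr]; exact hs
  · simp only [if_neg hrl] at hs ⊢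
    refine ⟨?_, ?_, ?_⟩
    · rw [hs.1]; exact Finset.sum_congr rfl (fun p hp => by
        simp only [Finset.mem_Icc] at hp; exact h p hp.1 hp.2)
    · exact SegInv_congr_c t (2*node) l ((l+r)/2) c c' (by omega)
        (fun p h1 h2 => h p h1 (by omega)) hs.2.1
    · exact SegInv_congr_c t (2*node+1) ((l+r)/2+1) r c c' (by omega)
        (fun p h1 h2 => h p (by omega) h2) hs.2.2
termination_by r - l
decreasing_by all_goals omega

theorem getD_replicate_zero (m j : Nat) : (List.replicate m (0:Int)).getD j 0 = 0 := by
  rcases Nat.lt_or_ge j m with h | h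
  · rw [List.getD_eq_getElem _ _ (by simpa using h)]; simp
  · rw [List.getD_eq_default _ _ (by simpa using h)]

theorem SegInv_zero (m node l r : Nat) : SegInv (List.replicate m (0:Int)) node l r (fun _ => 0) := by
  rw [SegInv]
  by_cases hrl : r ≤ l
  · simp only [if_pos hrl, getD_replicate_zero]
  · simp only [if_neg hrl, getD_replicate_zero]
    exact ⟨by simp [pvSum], SegInv_zero m (2*node) l ((l+r)/2), SegInv_zero m (2*node+1) ((l+r)/2+1) r⟩
termination_by r - l
decreasing_by all_goals omega

theorem SegInv_root (t : List Int) (node l r : Nat) (c : Nat → Int) (hlr : l ≤ r)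
    (hs : SegInv t node l r c) : t.getD node 0 = pvSum c l r := by
  rw [SegInv] at hs
  by_cases hrl : r ≤ l
  · simp only [if_pos hrl] at hs
    have : l = r := le_antisymm hlr hrl
    subst this; simpa [pvSum] using hs
  · simp only [if_neg hrl] at hs; exact hs.1

theorem pvSum_split (c : Nat → Int) (l mid r : Nat) (h1 : l ≤ mid) (h2 : mid < r) :
    pvSum c l r = pvSum c l mid + pvSum c (mid+1) r := by
  unfold pvSum
  rw [← Finset.sum_union]
  · congr 1
    ext p; simp [Finset.mem_Icc, Finset.mem_union]; omega
  · rw [Finset.disjoint_left]; intro p hp hq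
    simp [Finset.mem_Icc] at hp hq; omega

theorem node_lt_4N (node d N : Nat) (hN : 1 ≤ N)
    (hB : node < 2^(d+1)) (hD : 2^d ≤ 2*N - 2 ∨ node = 1) : node < 4*N := by
  rcases hD with h | rfl
  · have : (2:Nat)^(d+1) = 2 * 2^d := by rw [pow_succ]; ring
    omega
  · omega

theorem update_spec_go (f : Nat) (t : List Int) (node l r idx : Nat) (δ : Int) (c : Nat → Int) (d N : Nat) (hf : r - l < f)
    (ht : t.length = 4*N) (hN : 1 ≤ N) (hnode : 1 ≤ node) (hr : r ≤ N - 1) (hlr : l ≤ r)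
    (hi1 : l ≤ idx) (hi2 : idx ≤ r)
    (hB : node < 2^(d+1)) (hC : (r - l + 1) * 2^d ≤ N - 1 + 2^d) (hD : 2^d ≤ 2*N - 2 ∨ node = 1)
    (hs : SegInv t node l r c) :
    (pvUpdateGo f t node l r idx δ).length = t.length ∧
    SegInv (pvUpdateGo f t node l r idx δ) node l r (fun p => if p = idx then c p + δ else c p) ∧
    (∀ j, ¬ isDesc node j → (pvUpdateGo f t node l r idx δ).getD j 0 = t.getD j 0) := by
  have hlt4 : node < 4*N := node_lt_4N node d N hN hB hD
  obtain ⟨f', rfl⟩ : ∃ f', f = f' + 1 := ⟨f - 1, by omega⟩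
  simp only [pvUpdateGo]
  by_cases hrl : r ≤ l
  · simp only [if_pos hrl]
    have hl : l = r := le_antisymm hlr hrl
    have hidx : idx = l := by omega
    refine ⟨by simp, ?_, ?_⟩
    · rw [SegInv] at hs ⊢
      simp only [if_pos hrl] at hs ⊢
      rw [getD_set_lt _ _ _ _ (by omega), if_pos rfl]
      show t.getD node 0 + δ = if l = idx then c l + δ else c l
      rw [if_pos hidx.symm, hs]
    · intro j hj
      rw [getD_set_lt _ _ _ _ (by omega)]
      have : j ≠ node := fun h => hj (h ▸ isDesc_self node)
      simp [this]
  · simp only [if_neg hrl]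
    have hlr' : l < r := by omega
    set mid := (l + r) / 2 with hmid
    have hmid1 : l ≤ mid := by omega
    have hmid2 : mid < r := by omega
    rw [SegInv] at hs
    simp only [if_neg hrl] at hs
    obtain ⟨hsv, hsL, hsR⟩ := hs
    have hpow : (2:Nat)^(d+1) = 2 * 2^d := by rw [pow_succ]; ring
    have hpow2 : (2:Nat)^(d+1+1) = 2 * 2^(d+1) := by rw [pow_succ]; ring
    have hd1 : 2^(d+1) ≤ 2*N - 2 := by
      have h2 : 2 * 2^d ≤ (r - l + 1) * 2^d := by
        apply Nat.mul_le_mul_right; omega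
      have hp1 : 1 ≤ (2:Nat)^d := Nat.one_le_two_pow
      omega
    have hCL : (mid - l + 1) * 2^(d+1) ≤ N - 1 + 2^(d+1) := by
      have h1 : (mid - l + 1) * 2^(d+1) = (2 * (mid - l + 1)) * 2^d := by rw [hpow]; ring
      have h2 : 2 * (mid - l + 1) ≤ (r - l + 1) + 1 := by omega
      calc (mid - l + 1) * 2^(d+1) = (2 * (mid - l + 1)) * 2^d := h1
        _ ≤ ((r - l + 1) + 1) * 2^d := Nat.mul_le_mul_right _ h2
        _ = (r - l + 1) * 2^d + 2^d := by ring
        _ ≤ N - 1 + 2^d + 2^d := by omega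
        _ = N - 1 + 2^(d+1) := by rw [hpow]; ring
    have hCR : (r - (mid+1) + 1) * 2^(d+1) ≤ N - 1 + 2^(d+1) := by
      have h2 : 2 * (r - (mid+1) + 1) ≤ (r - l + 1) + 1 := by omega
      calc (r - (mid+1) + 1) * 2^(d+1) = (2 * (r - (mid+1) + 1)) * 2^d := by rw [hpow]; ring
        _ ≤ ((r - l + 1) + 1) * 2^d := Nat.mul_le_mul_right _ h2
        _ = (r - l + 1) * 2^d + 2^d := by ring
        _ ≤ N - 1 + 2^d + 2^d := by omega
        _ = N - 1 + 2^(d+1) := by rw [hpow]; ring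
    by_cases hside : idx ≤ mid
    · simp only [if_pos hside]
      obtain ⟨ihlen, ihseg, ihout⟩ := update_spec_go f' t (2*node) l mid idx δ c (d+1) N (by omega) ht hN
        (by omega) (by omega) hmid1 hi1 hside (by omega) hCL (Or.inl hd1) hsL
      set t1 := pvUpdateGo f' t (2*node) l mid idx δ with ht1
      have hRt1 : SegInv t1 (2*node+1) (mid+1) r c :=
        SegInv_congr_t t t1 (2*node+1) (mid+1) r c
          (fun j hj => (ihout j (fun hd => isDesc_sib node j hnode hd hj)).symm) hsR
      have hRt1' : SegInv t1 (2*node+1) (mid+1) r (fun p => if p = idx then c p + δ else c p) :=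
        SegInv_congr_c t1 (2*node+1) (mid+1) r c _ (by omega)
          (fun p h1 h2 => by simp [show p ≠ idx by omega]) hRt1
      have hlen1 : t1.length = 4*N := by rw [ihlen, ht]
      refine ⟨by simp [hlen1, ht], ?_, ?_⟩
      · rw [SegInv]
        simp only [if_neg hrl]
        have hne1 : (2*node : Nat) ≠ node := by omega
        have hne2 : (2*node+1 : Nat) ≠ node := by omega
        refine ⟨?_, ?_, ?_⟩
        · rw [getD_set_lt _ _ _ _ (by omega), if_pos rfl,
            SegInv_root t1 (2*node) l mid _ hmid1 ihseg,
            SegInv_root t1 (2*node+1) (mid+1) r _ (by omega) hRt1',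
            pvSum_split _ l mid r hmid1 hmid2]
        · exact SegInv_congr_t t1 _ (2*node) l mid _
            (fun j hj => by
              rw [getD_set_lt _ _ _ _ (by omega)]
              have : j ≠ node := by have := isDesc_le _ _ hj; omega
              simp [this]) ihseg
        · exact SegInv_congr_t t1 _ (2*node+1) ((l+r)/2+1) r _
            (fun j hj => by
              rw [getD_set_lt _ _ _ _ (by omega)]
              have : j ≠ node := by have := isDesc_le _ _ hj; omega
              simp [this]) hRt1'
      · intro j hj
        have hjn : j ≠ node := fun h => hj (h ▸ isDesc_self node)
        rw [getD_set_lt _ _ _ _ (by omega)]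
        simp only [if_neg hjn]
        exact ihout j (fun h => hj (isDesc_left node j h))
    · simp only [if_neg hside]
      obtain ⟨ihlen, ihseg, ihout⟩ := update_spec_go f' t (2*node+1) (mid+1) r idx δ c (d+1) N (by omega) ht hN
        (by omega) hr (by omega) (by omega) hi2 (by omega) hCR (Or.inl hd1) hsR
      set t1 := pvUpdateGo f' t (2*node+1) (mid+1) r idx δ with ht1
      have hLt1 : SegInv t1 (2*node) l mid c :=
        SegInv_congr_t t t1 (2*node) l mid c
          (fun j hj => (ihout j (fun hd => isDesc_sib node j hnode hj hd)).symm) hsL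
      have hLt1' : SegInv t1 (2*node) l mid (fun p => if p = idx then c p + δ else c p) :=
        SegInv_congr_c t1 (2*node) l mid c _ hmid1
          (fun p h1 h2 => by simp [show p ≠ idx by omega]) hLt1
      have hlen1 : t1.length = 4*N := by rw [ihlen, ht]
      refine ⟨by simp [hlen1, ht], ?_, ?_⟩
      · rw [SegInv]
        simp only [if_neg hrl]
        have hne1 : (2*node : Nat) ≠ node := by omega
        have hne2 : (2*node+1 : Nat) ≠ node := by omega
        refine ⟨?_, ?_, ?_⟩
        · rw [getD_set_lt _ _ _ _ (by omega), if_pos rfl,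
            SegInv_root t1 (2*node) l mid _ hmid1 hLt1',
            SegInv_root t1 (2*node+1) (mid+1) r _ (by omega) ihseg,
            pvSum_split _ l mid r hmid1 hmid2]
        · exact SegInv_congr_t t1 _ (2*node) l mid _
            (fun j hj => by
              rw [getD_set_lt _ _ _ _ (by omega)]
              have : j ≠ node := by have := isDesc_le _ _ hj; omega
              simp [this]) hLt1'
        · exact SegInv_congr_t t1 _ (2*node+1) ((l+r)/2+1) r _
            (fun j hj => by
              rw [getD_set_lt _ _ _ _ (by omega)]
              have : j ≠ node := by have := isDesc_le _ _ hj; omega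
              simp [this]) ihseg
      · intro j hj
        have hjn : j ≠ node := fun h => hj (h ▸ isDesc_self node)
        rw [getD_set_lt _ _ _ _ (by omega)]
        simp only [if_neg hjn]
        exact ihout j (fun h => hj (isDesc_right node j h))
termination_by f
decreasing_by all_goals omega

theorem update_spec (t : List Int) (node l r idx : Nat) (δ : Int) (c : Nat → Int) (d N : Nat)
    (ht : t.length = 4*N) (hN : 1 ≤ N) (hnode : 1 ≤ node) (hr : r ≤ N - 1) (hlr : l ≤ r)
    (hi1 : l ≤ idx) (hi2 : idx ≤ r)
    (hB : node < 2^(d+1)) (hC : (r - l + 1) * 2^d ≤ N - 1 + 2^d) (hD : 2^d ≤ 2*N - 2 ∨ node = 1)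
    (hs : SegInv t node l r c) :
    (pvUpdate t node l r idx δ).length = t.length ∧
    SegInv (pvUpdate t node l r idx δ) node l r (fun p => if p = idx then c p + δ else c p) ∧
    (∀ j, ¬ isDesc node j → (pvUpdate t node l r idx δ).getD j 0 = t.getD j 0) := by
  unfold pvUpdate
  exact update_spec_go (r - l + 1) t node l r idx δ c d N (by omega) ht hN hnode hr hlr hi1 hi2 hB hC hD hs

theorem query_spec_go (f : Nat) (t : List Int) (node l r rl : Nat) (c : Nat → Int)
    (hf : r - l < f) (hlr : l ≤ r) (hpos : ∀ p, l ≤ p → p ≤ r → 0 ≤ c p) (hs : SegInv t node l r c) :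
    (pvQueryGo f t node l r rl = -1 ∧ ∀ p, l ≤ p → p ≤ r → p ≤ rl → c p = 0)
    ∨ (∃ p : Nat, pvQueryGo f t node l r rl = (p : Int) ∧ l ≤ p ∧ p ≤ r ∧ p ≤ rl ∧ 0 < c p ∧
        ∀ q, p < q → q ≤ r → q ≤ rl → c q = 0) := by
  obtain ⟨f', rfl⟩ : ∃ f', f = f' + 1 := ⟨f - 1, by omega⟩
  simp only [pvQueryGo]
  by_cases h0 : l > rl ∨ t.getD node 0 = 0
  · simp only [if_pos h0]
    left
    refine ⟨by trivial, ?_⟩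
    rcases h0 with h0 | h0
    · intro p hp1 hp2 hp3; omega
    · intro p hp1 hp2 hp3
      have hsum : pvSum c l r = 0 := by rw [← SegInv_root t node l r c hlr hs]; exact h0
      have := (Finset.sum_eq_zero_iff_of_nonneg (by
        intro q hq; simp only [Finset.mem_Icc] at hq; exact hpos q hq.1 hq.2)).mp hsum
      exact this p (by simp [Finset.mem_Icc]; omega)
  · simp only [if_neg h0]
    push Not at h0
    obtain ⟨hlrl, hnz⟩ := h0
    by_cases hrl : r ≤ l
    · simp only [if_pos hrl]
      right
      refine ⟨l, rfl, le_rfl, hlr, hlrl, ?_, ?_⟩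
      · have hl : l = r := le_antisymm hlr hrl
        rw [SegInv] at hs
        simp only [if_pos hrl] at hs
        rcases lt_or_eq_of_le (hpos l le_rfl hlr) with h | h
        · exact h
        · exact absurd (hs.trans h.symm) hnz
      · intro q h1 h2 h3; omega
    · simp only [if_neg hrl]
      have hlr' : l < r := by omega
      set mid := (l + r) / 2 with hmid
      have hmid1 : l ≤ mid := by omega
      have hmid2 : mid < r := by omega
      rw [SegInv] at hs
      simp only [if_neg hrl] at hs
      obtain ⟨hsv, hsL, hsR⟩ := hs
      rcases query_spec_go f' t (2*node+1) (mid+1) r rl c (by omega) (by omega)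
        (fun p h1 h2 => hpos p (by omega) h2) hsR with ⟨hR, hRz⟩ | ⟨p, hp, hp1, hp2, hp3, hp4, hp5⟩
      · rw [hR]
        rw [if_neg (show ¬((-1:Int) ≠ -1) from fun h => h rfl)]
        rcases query_spec_go f' t (2*node) l mid rl c (by omega) hmid1
          (fun p h1 h2 => hpos p h1 (by omega)) hsL with ⟨hL, hLz⟩ | ⟨p, hp, hp1, hp2, hp3, hp4, hp5⟩
        · rw [hL]
          left
          refine ⟨rfl, ?_⟩
          intro q h1 h2 h3
          by_cases hq : q ≤ mid
          · exact hLz q h1 hq h3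
          · exact hRz q (by omega) h2 h3
        · rw [hp]
          right
          refine ⟨p, rfl, hp1, by omega, hp3, hp4, ?_⟩
          intro q h1 h2 h3
          by_cases hq : q ≤ mid
          · exact hp5 q h1 hq h3
          · exact hRz q (by omega) h2 h3
      · rw [hp]
        have hne : ((p : Int) ≠ -1) := by omega
        rw [if_pos hne]
        right
        exact ⟨p, rfl, by omega, hp2, hp3, hp4, fun q h1 h2 h3 => hp5 q h1 h2 h3⟩
termination_by f
decreasing_by all_goals omega

theorem query_spec (t : List Int) (node l r rl : Nat) (c : Nat → Int)
    (hlr : l ≤ r) (hpos : ∀ p, l ≤ p → p ≤ r → 0 ≤ c p) (hs : SegInv t node l r c) :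
    (pvQuery t node l r rl = -1 ∧ ∀ p, l ≤ p → p ≤ r → p ≤ rl → c p = 0)
    ∨ (∃ p : Nat, pvQuery t node l r rl = (p : Int) ∧ l ≤ p ∧ p ≤ r ∧ p ≤ rl ∧ 0 < c p ∧
        ∀ q, p < q → q ≤ r → q ≤ rl → c q = 0) := by
  unfold pvQuery
  exact query_spec_go (r - l + 1) t node l r rl c (by omega) hlr hpos hs

-- B-side multiset count: occurrences of coords[p] among pending ++ eligible
def pvCnt2 (coords pend elig : List Int) (p : Nat) : Int :=
  (pend.count (coords.getD p 0) : Int) + (elig.count (coords.getD p 0) : Int)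

def pvRelB (coords t pend elig : List Int) : Prop :=
  t.length = 4 * coords.length ∧ (∀ x ∈ pend, x ∈ coords) ∧ (∀ x ∈ elig, x ∈ coords) ∧
  SegInv t 1 0 (coords.length - 1) (pvCnt2 coords pend elig)

theorem bisect_lt_iff (L : List Int) (hL : L.Pairwise (· ≤ ·)) (x : Int) (i : Nat) (hi : i < L.length) :
    L[i] ≤ x ↔ i < PySem.List.bisectRight L x := by
  obtain ⟨h1, h2, h3⟩ := PySem.List.bisectRight_spec L x hL
  constructor
  · intro h
    by_contra hc
    exact absurd (h3 i hi (by omega)) (by omega)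
  · intro h
    exact h2 i hi h

theorem count_cons_int (a : Int) (l : List Int) (y : Int) :
    ((a :: l).count y : Int) = (l.count y : Int) + (if a = y then 1 else 0) := by
  rw [List.count_cons]
  by_cases h : a = y
  · simp [h]
  · simp [h]

theorem count_erase_int (l : List Int) (M : Int) (h : M ∈ l) (y : Int) :
    ((l.erase M).count y : Int) = (l.count y : Int) - (if M = y then 1 else 0) := by
  have hp : (l.count y : Int) = (((M :: l.erase M).count y : Nat) : Int) := by
    exact_mod_cast congrArg (fun t => ((t : Nat) : Int)) ((List.perm_cons_erase h).count_eq y)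
  rw [hp, count_cons_int]
  ring

theorem count_append_int (l1 l2 : List Int) (y : Int) :
    ((l1 ++ l2).count y : Int) = (l1.count y : Int) + (l2.count y : Int) := by
  rw [List.count_append]; push_cast; ring

theorem count_singleton_append_int (l : List Int) (w y : Int) :
    ((l ++ [w]).count y : Int) = (l.count y : Int) + (if w = y then 1 else 0) := by
  rw [count_append_int, count_cons_int]
  simp

theorem count_filter_int (p : Int → Bool) (l : List Int) (a : Int) :
    ((l.filter p).count a : Int) = if p a then (l.count a : Int) else 0 := by
  by_cases h : p a
  · rw [if_pos h, List.count_filter h]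
  · rw [if_neg h]
    have : a ∉ l.filter p := fun hc => h (List.of_mem_filter hc)
    rw [List.count_eq_zero.mpr this]
    simp

theorem count_zero_of_not_mem_int (l : List Int) (a : Int) (h : a ∉ l) : ((l.count a : Nat) : Int) = 0 := by
  rw [List.count_eq_zero.mpr h]; simp

-- B's transfer loop is a stable partition of `pending` by (· ≤ x)
theorem transfer_eq (x : Int) (pend e0 st0 : List Int) :
    pend.foldl (fun (pr : List Int × List Int) f =>
        if f ≤ x then (pr.1 ++ [f], pr.2) else (pr.1, pr.2 ++ [f])) (e0, st0)
    = (e0 ++ pend.filter (fun f => decide (f ≤ x)), st0 ++ pend.filter (fun f => !decide (f ≤ x))) := by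
  induction pend generalizing e0 st0 with
  | nil => simp
  | cons a l ih =>
    by_cases h : a ≤ x
    · simp [h, ih]
    · simp [h, ih]

-- dict-of-enumerate lookup
theorem dict_fold_notmem (ps : List (Int × Int)) (d : PySem.Dict Int Int) (x : Int)
    (h : ∀ p ∈ ps, p.1 ≠ x) :
    (ps.foldl (fun acc p => acc.insert p.1 p.2) d).get? x = d.get? x := by
  induction ps generalizing d with
  | nil => rfl
  | cons p ps ih =>
    rw [List.foldl_cons, ih _ (fun q hq => h q (List.mem_cons_of_mem p hq))]
    exact PySem.Dict.get?_insert_of_ne d p.2 (Ne.symm (h p List.mem_cons_self))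

theorem rank_get (L : List Int) (hL : L.Nodup) (st : Int) (d : PySem.Dict Int Int)
    (i : Nat) (hi : i < L.length) :
    (((PySem.List.enumerate L st).map (fun p => (p.2, p.1))).foldl
        (fun acc p => acc.insert p.1 p.2) d).get? L[i] = some (st + i) := by
  induction L generalizing st d i with
  | nil => simp at hi
  | cons x xs ih =>
    rw [PySem.List.enumerate_cons, List.map_cons, List.foldl_cons]
    rcases i with _ | i
    · have hx : ∀ p ∈ (PySem.List.enumerate xs (st+1)).map (fun p => (p.2, p.1)), p.1 ≠ x := by
        intro p hp
        obtain ⟨q, hq, rfl⟩ := List.mem_map.mp hp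
        obtain ⟨k, hk, rfl⟩ := (PySem.List.mem_enumerate_iff _ _ _).mp hq
        simp only
        intro hc
        exact (List.nodup_cons.mp hL).1 (hc ▸ List.getElem_mem hk)
      rw [List.getElem_cons_zero, dict_fold_notmem _ _ _ hx, PySem.Dict.get?_insert_self]
      norm_num
    · rw [List.getElem_cons_succ, ih (List.nodup_cons.mp hL).2 (st+1) _ i (by simpa using hi)]
      congr 1
      push_cast; ring

-- second update of a step: count bookkeeping for appending w = coords[i0] to pending
theorem rel_insert2 (coords t pend2 e2 : List Int) (hcs : coords.Pairwise (· < ·))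
    (c : Nat → Int) (w : Int) (i0 : Nat) (hi0 : i0 < coords.length) (hw : coords[i0] = w)
    (hlen : t.length = 4 * coords.length)
    (hpsub : ∀ x ∈ pend2, x ∈ coords) (hesub : ∀ x ∈ e2, x ∈ coords)
    (hseg : SegInv t 1 0 (coords.length - 1) c)
    (hc : ∀ q, q < coords.length → c q = pvCnt2 coords pend2 e2 q) :
    pvRelB coords (pvUpdate t 1 0 (coords.length - 1) i0 1) (pend2 ++ [w]) e2 := by
  have hnodup : coords.Nodup := hcs.imp ne_of_lt
  set n := coords.length with hn
  have hn1 : 1 ≤ n := by omega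
  obtain ⟨hlen2, hseg2, _⟩ := update_spec t 1 0 (n-1) i0 1 c 0 n hlen hn1 le_rfl le_rfl
    (by omega) (by omega) (by omega) (by norm_num) (by norm_num) (Or.inr rfl) hseg
  refine ⟨by rw [hlen2, hlen], ?_, hesub, ?_⟩
  · intro x hx
    rcases List.mem_append.mp hx with hx' | hx'
    · exact hpsub x hx'
    · rw [List.mem_singleton.mp hx']
      exact hw ▸ List.getElem_mem hi0
  · refine SegInv_congr_c _ 1 0 (n-1) _ _ (by omega) ?_ hseg2
    intro q h1 h2
    have hq : q < n := by omega
    have hgd : coords.getD q 0 = coords[q] := List.getD_eq_getElem coords 0 hq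
    unfold pvCnt2
    rw [count_singleton_append_int, hgd, hc q hq]
    unfold pvCnt2
    rw [hgd]
    by_cases hqi : q = i0
    · subst hqi
      rw [if_pos rfl, if_pos (by rw [← hw])]
      ring
    · rw [if_neg hqi, if_neg (fun hwq => hqi (((List.Nodup.getElem_inj_iff hnodup).mp (hw.trans hwq)).symm))]
      ring

def pvFA (s : Int) (coords : List Int) (acc : List Int × Int × Int) (m : Int × Int) :
    List Int × Int × Int :=
  let idx : Int := (PySem.List.bisectRight coords m.1 : Int) - 1
  let best_rank : Int := if 0 ≤ idx then pvQuery acc.1 1 0 (coords.length-1) idx.toNat else -1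
  let acc2 : List Int × Int × Int :=
    if best_rank ≠ -1 then
      (pvUpdate acc.1 1 0 (coords.length-1) best_rank.toNat (-1),
       acc.2.1 + (m.1 - PySem.List.pyGetD coords best_rank 0), acc.2.2)
    else (acc.1, acc.2.1, acc.2.2 - 1)
  (pvUpdate acc2.1 1 0 (coords.length-1)
    (PySem.Dict.getD (PySem.Dict.ofList ((PySem.List.enumerate coords).map (fun p => (p.2, p.1)))) (m.2 + s) 0).toNat 1,
   acc2.2.1, acc2.2.2)

def pvFB (s : Int) (acc : List Int × List Int × Int × Int) (m : Int × Int) :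
    List Int × List Int × Int × Int :=
  let tr := acc.1.foldl (fun (pr : List Int × List Int) f =>
      if f ≤ m.1 then (pr.1 ++ [f], pr.2) else (pr.1, pr.2 ++ [f])) (acc.2.1, ([] : List Int))
  let acc2 : List Int × Int × Int :=
    if tr.1 ≠ [] then
      match PySem.List.max? tr.1 (fun y => y) with
      | some best =>
        match PySem.List.remove? tr.1 best with
        | some e2 => (e2, acc.2.2.1 + (m.1 - best), acc.2.2.2)
        | none => (tr.1, acc.2.2.1, acc.2.2.2)
      | none => (tr.1, acc.2.2.1, acc.2.2.2)
    else (tr.1, acc.2.2.1, acc.2.2.2 - 1)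
  (tr.2 ++ [m.2 + s], acc2.1, acc2.2.1, acc2.2.2)

theorem step_relB (s : Int) (coords : List Int) (hcs : coords.Pairwise (· < ·))
    (m : Int × Int) (t pend elig : List Int) (ts u : Int)
    (hm : m.2 + s ∈ coords)
    (helig : ∀ x ∈ elig, x ≤ m.1)
    (hrel : pvRelB coords t pend elig) :
    ∃ t2 p2 e2 ts2 u2,
      pvFA s coords (t, ts, u) m = (t2, ts2, u2) ∧
      pvFB s (pend, elig, ts, u) m = (p2, e2, ts2, u2) ∧
      pvRelB coords t2 p2 e2 ∧ (∀ x ∈ e2, x ≤ m.1) := by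
  obtain ⟨hlen, hpsub, hesub, hseg⟩ := hrel
  have hcle : coords.Pairwise (· ≤ ·) := hcs.imp le_of_lt
  have hnodup : coords.Nodup := hcs.imp ne_of_lt
  have hn1 : 1 ≤ coords.length := List.length_pos_iff.mpr (List.ne_nil_of_mem hm)
  obtain ⟨i0, hi0, hwi0⟩ := List.getElem_of_mem hm
  have hrank : PySem.Dict.getD
      (PySem.Dict.ofList ((PySem.List.enumerate coords).map (fun p => (p.2, p.1)))) (m.2 + s) 0
      = (i0 : Int) := by
    show ((((PySem.List.enumerate coords 0).map (fun p => (p.2, p.1))).foldl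
        (fun acc p => acc.insert p.1 p.2) PySem.Dict.empty).get? (m.2+s)).getD 0 = (i0 : Int)
    rw [← hwi0, rank_get coords hnodup 0 PySem.Dict.empty i0 hi0]
    norm_num
  have hpos : ∀ p, 0 ≤ p → p ≤ coords.length - 1 → 0 ≤ pvCnt2 coords pend elig p :=
    fun p _ _ => by unfold pvCnt2; positivity
  unfold pvFA pvFB
  dsimp only
  rw [hrank, Int.toNat_natCast, transfer_eq m.1 pend elig []]
  dsimp only
  rw [List.nil_append]
  set n := coords.length with hndef
  set b1 := PySem.List.bisectRight coords m.1 with hb1def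
  set E := elig ++ pend.filter (fun f => decide (f ≤ m.1)) with hEdef
  set P := pend.filter (fun f => !decide (f ≤ m.1)) with hPdef
  have hEmem : ∀ y, y ∈ E ↔ y ∈ elig ∨ (y ∈ pend ∧ y ≤ m.1) := by
    intro y
    simp [hEdef, List.mem_append, List.mem_filter]
  have hEle : ∀ y ∈ E, y ≤ m.1 := by
    intro y hy
    rcases (hEmem y).mp hy with h | h
    · exact helig y h
    · exact h.2
  have hEsub : ∀ y ∈ E, y ∈ coords := by
    intro y hy
    rcases (hEmem y).mp hy with h | h
    · exact hesub y h
    · exact hpsub y h.1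
  have hEcount : ∀ y : Int, (E.count y : Int) =
      if y ≤ m.1 then (pend.count y : Int) + (elig.count y : Int) else 0 := by
    intro y
    rw [hEdef, count_append_int, count_filter_int]
    by_cases hy : y ≤ m.1
    · simp only [hy, decide_true, if_pos] ; ring
    · have h0 : (elig.count y : Int) = 0 :=
        count_zero_of_not_mem_int elig y (fun hc => hy (helig y hc))
      simp only [hy, decide_false, Bool.false_eq_true, if_false]
      simp [h0]
  have hPcount : ∀ y : Int, (P.count y : Int) =
      if y ≤ m.1 then 0 else (pend.count y : Int) := by
    intro y
    rw [hPdef, count_filter_int]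
    by_cases hy : y ≤ m.1 <;> simp [hy]
  have hPsub : ∀ y ∈ P, y ∈ coords := by
    intro y hy
    exact hpsub y (List.mem_of_mem_filter hy)
  -- core correspondence of the pick
  by_cases hb1 : 1 ≤ b1
  · rw [if_pos (show (0:Int) ≤ (b1:Int) - 1 by omega)]
    have htn : ((b1:Int) - 1).toNat = b1 - 1 := by omega
    rw [htn]
    rcases query_spec t 1 0 (n-1) (b1-1) (pvCnt2 coords pend elig) (by omega) hpos hseg with
      ⟨hq, hz⟩ | ⟨p, hqp, hp1, hp2, hp3, hpc, hpmax⟩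
    · -- MISS with idx ≥ 0 : region empty ⇒ E = []
      have hE : E = [] := by
        rw [List.eq_nil_iff_forall_not_mem]
        intro y hy
        obtain ⟨q, hqlt, rfl⟩ := List.getElem_of_mem (hEsub y hy)
        have hqb : q < b1 := (bisect_lt_iff coords hcle m.1 q hqlt).mp (hEle _ hy)
        have hz0 := hz q (by omega) (by omega) (by omega)
        unfold pvCnt2 at hz0
        rw [List.getD_eq_getElem coords 0 hqlt] at hz0
        have hcnt : 0 < E.count coords[q] := List.count_pos_iff.mpr hy
        have := hEcount coords[q]
        rw [if_pos (hEle _ hy)] at this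
        omega
      rw [hq, if_neg (show ¬((-1:Int) ≠ -1) from fun h => h rfl),
        if_neg (show ¬(E ≠ []) from fun h => h hE)]
      dsimp only
      refine ⟨_, _, _, _, _, rfl, rfl, ?_, ?_⟩
      · -- relation: counts of (P, E=[]) equal old counts
        rw [hE]
        refine rel_insert2 coords t P [] hcs _ (m.2+s) i0 hi0 hwi0 hlen hPsub (by simp) hseg ?_
        intro q hq'
        have hgd : coords.getD q 0 = coords[q] := List.getD_eq_getElem coords 0 hq'
        unfold pvCnt2
        rw [hgd]
        have hEc := hEcount coords[q]
        have hPc := hPcount coords[q]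
        have hE0 : (E.count coords[q] : Int) = 0 := by rw [hE]; simp
        by_cases hle : coords[q] ≤ m.1
        · rw [if_pos hle] at hEc hPc
          have h0 : ((List.count coords[q] []:Nat):Int) = 0 := by simp
          rw [hPc]
          simp only [List.count_nil, Nat.cast_zero]
          omega
        · rw [if_neg hle] at hEc hPc
          rw [hPc]
          simp only [List.count_nil, Nat.cast_zero]
          have h0 : (elig.count coords[q] : Int) = 0 :=
            count_zero_of_not_mem_int elig _ (fun hc => hle (helig _ hc))
          omega
      · rw [hE]; simp
    · -- HIT: A picks rightmost p; B picks max(E) = coords[p]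
      have hpn : p < n := by omega
      have hcple : coords[p] ≤ m.1 := (bisect_lt_iff coords hcle m.1 p hpn).mpr (by omega)
      have hEcp : coords[p] ∈ E := by
        have := hEcount coords[p]
        rw [if_pos hcple] at this
        unfold pvCnt2 at hpc
        rw [List.getD_eq_getElem coords 0 hpn] at hpc
        exact List.count_pos_iff.mp (by omega)
      have hmaxE : ∀ y ∈ E, y ≤ coords[p] := by
        intro y hy
        obtain ⟨q, hqlt, rfl⟩ := List.getElem_of_mem (hEsub y hy)
        have hqb : q < b1 := (bisect_lt_iff coords hcle m.1 q hqlt).mp (hEle _ hy)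
        have hcnt : 0 < pvCnt2 coords pend elig q := by
          unfold pvCnt2
          rw [List.getD_eq_getElem coords 0 hqlt]
          have hcnt' : 0 < E.count coords[q] := List.count_pos_iff.mpr hy
          have := hEcount coords[q]
          rw [if_pos (hEle _ hy)] at this
          omega
        have hqp' : q ≤ p := by
          by_contra hcon
          have := hpmax q (by omega) (by omega) (by omega)
          omega
        rcases Nat.eq_or_lt_of_le hqp' with rfl | hlt
        · exact le_rfl
        · exact le_of_lt ((List.pairwise_iff_getElem.mp hcs) q p hqlt hpn hlt)
      have hEne : E ≠ [] := List.ne_nil_of_mem hEcp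
      obtain ⟨M, hM⟩ : ∃ M, PySem.List.max? E (fun y => y) = some M := by
        cases h : PySem.List.max? E (fun y => y) with
        | none => exact absurd ((PySem.List.max?_eq_none_iff E _).mp h) hEne
        | some M => exact ⟨M, rfl⟩
      have hMmem : M ∈ E := PySem.List.max?_mem hM
      have hMeq : M = coords[p] :=
        le_antisymm (hmaxE M hMmem) (PySem.List.max?_isMax hM coords[p] hEcp)
      rw [hqp, if_pos (show ((p:Nat):Int) ≠ -1 by omega), if_pos hEne, hM]
      dsimp only
      rw [PySem.List.remove?_eq_some_erase E M hMmem]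
      dsimp only
      have hget : PySem.List.pyGetD coords ((p:Nat):Int) 0 = coords[p] := by
        rw [PySem.List.pyGetD_natCast, List.getD_eq_getElem coords 0 hpn]
      rw [hget, Int.toNat_natCast, hMeq]
      refine ⟨_, _, _, _, _, rfl, rfl, ?_, ?_⟩
      · -- relation after decrement at p / erase of coords[p]
        obtain ⟨hlen1, hseg1, _⟩ := update_spec t 1 0 (n-1) p (-1) (pvCnt2 coords pend elig) 0 n
          hlen hn1 le_rfl le_rfl (by omega) (by omega) (by omega) (by norm_num) (by norm_num)
          (Or.inr rfl) hseg
        refine rel_insert2 coords _ P (E.erase coords[p]) hcs _ (m.2+s) i0 hi0 hwi0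
          (by rw [hlen1, hlen]) hPsub
          (fun x hx => hEsub x (List.mem_of_mem_erase hx)) hseg1 ?_
        intro q hq'
        have hgd : coords.getD q 0 = coords[q] := List.getD_eq_getElem coords 0 hq'
        unfold pvCnt2
        rw [hgd, count_erase_int E coords[p] hEcp coords[q]]
        have hEc := hEcount coords[q]
        have hPc := hPcount coords[q]
        by_cases hqp' : q = p
        · subst hqp'
          rw [if_pos rfl, if_pos rfl]
          rw [if_pos hcple] at hEc
          rw [if_pos hcple] at hPc
          omega
        · have hne : coords[p] ≠ coords[q] :=
            fun hc => hqp' ((List.Nodup.getElem_inj_iff hnodup).mp hc.symm)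
          rw [if_neg hqp', if_neg hne]
          by_cases hle : coords[q] ≤ m.1
          · rw [if_pos hle] at hEc hPc
            omega
          · rw [if_neg hle] at hEc hPc
            have h0 : (elig.count coords[q] : Int) = 0 :=
              count_zero_of_not_mem_int elig _ (fun hc => hle (helig _ hc))
            omega
      · intro x hx
        exact hEle x (List.mem_of_mem_erase hx)
  · -- b1 = 0 : no coordinate ≤ start at all ⇒ A takes else-branch, E = []
    have hb10 : b1 = 0 := by omega
    have hE : E = [] := by
      rw [List.eq_nil_iff_forall_not_mem]
      intro y hy
      obtain ⟨q, hqlt, rfl⟩ := List.getElem_of_mem (hEsub y hy)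
      have hqb : q < b1 := (bisect_lt_iff coords hcle m.1 q hqlt).mp (hEle _ hy)
      omega
    rw [if_neg (show ¬((0:Int) ≤ (b1:Int) - 1) by omega),
      if_neg (show ¬((-1:Int) ≠ -1) from fun h => h rfl),
      if_neg (show ¬(E ≠ []) from fun h => h hE)]
    dsimp only
    refine ⟨_, _, _, _, _, rfl, rfl, ?_, ?_⟩
    · rw [hE]
      refine rel_insert2 coords t P [] hcs _ (m.2+s) i0 hi0 hwi0 hlen hPsub (by simp) hseg ?_
      intro q hq'
      have hgd : coords.getD q 0 = coords[q] := List.getD_eq_getElem coords 0 hq'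
      unfold pvCnt2
      rw [hgd]
      have hEc := hEcount coords[q]
      have hPc := hPcount coords[q]
      have hE0 : (E.count coords[q] : Int) = 0 := by rw [hE]; simp
      simp only [List.count_nil, Nat.cast_zero]
      by_cases hle : coords[q] ≤ m.1
      · rw [if_pos hle] at hEc hPc
        rw [hPc]; omega
      · rw [if_neg hle] at hEc hPc
        rw [hPc]
        have h0 : (elig.count coords[q] : Int) = 0 :=
          count_zero_of_not_mem_int elig _ (fun hc => hle (helig _ hc))
        omega
    · rw [hE]; simp

theorem fold_relB (s : Int) (coords : List Int) (hcs : coords.Pairwise (· < ·)) :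
    ∀ (rest : List (Int × Int)) (t pend elig : List Int) (ts u : Int),
      (∀ m ∈ rest, m.2 + s ∈ coords) →
      rest.Pairwise (fun a b => a.1 ≤ b.1) →
      (∀ x ∈ elig, ∀ m ∈ rest, x ≤ m.1) →
      pvRelB coords t pend elig →
      (rest.foldl (pvFA s coords) (t, ts, u)).2 = (rest.foldl (pvFB s) (pend, elig, ts, u)).2.2 := by
  intro rest
  induction rest with
  | nil => intro t pend elig ts u _ _ _ _; rfl
  | cons m rest ih =>
    intro t pend elig ts u hm hpair hbnd hrel
    rw [List.pairwise_cons] at hpair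
    obtain ⟨t2, p2, e2, ts2, u2, hA, hB, hrel2, hbnd2⟩ :=
      step_relB s coords hcs m t pend elig ts u (hm m List.mem_cons_self)
        (fun x hx => hbnd x hx m List.mem_cons_self) hrel
    rw [List.foldl_cons, List.foldl_cons, hA, hB]
    exact ih t2 p2 e2 ts2 u2 (fun x hx => hm x (List.mem_cons_of_mem m hx)) hpair.2
      (fun x hx m' hm' => le_trans (hbnd2 x hx) (hpair.1 m' hm')) hrel2

theorem min_total_slack_eq (meetings : List (Int × Int)) (k : Int) (s : Int) :
    min_total_slack meetings k s = min_total_slack_alt meetings k s := by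
  unfold min_total_slack min_total_slack_alt
  set ms := PySem.List.sorted meetings (fun x => x.1) with hms
  set coords := PySem.List.sorted (PySem.Set.ofList (ms.map (fun p => p.2 + s))) (fun v => v) with hcoords
  have hcs : coords.Pairwise (· < ·) := PySem.List.sorted_ofList_pairwise_lt _
  show (ms.foldl (pvFA s coords) (List.replicate (4*coords.length) (0:Int), (0:Int), k)).2.1
     = (ms.foldl (pvFB s) (([]:List Int), ([]:List Int), (0:Int), k)).2.2.1
  have hmem : ∀ m ∈ ms, m.2 + s ∈ coords := by
    intro m hm
    rw [hcoords, PySem.List.mem_sorted, PySem.Set.mem_ofList]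
    exact List.mem_map.mpr ⟨m, hm, rfl⟩
  have hpair : ms.Pairwise (fun a b => a.1 ≤ b.1) := PySem.List.sorted_pairwise meetings _
  have hrel0 : pvRelB coords (List.replicate (4*coords.length) (0:Int)) [] [] := by
    refine ⟨by simp, by simp, by simp, ?_⟩
    refine SegInv_congr_c _ 1 0 (coords.length - 1) (fun _ => 0) _ (by omega) ?_ (SegInv_zero _ 1 0 _)
    intro q _ _
    simp [pvCnt2]
  have := fold_relB s coords hcs ms _ [] [] 0 k hmem hpair (by simp) hrel0
  exact congrArg Prod.fst this

-- ===== VERDICT (by name: the statement is the Claim_ definition above) =====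
theorem min_total_slack_spec : Claim_equal_min_total_slack := by
  intro meetings k s _
  show min_total_slack meetings k s = min_total_slack_alt meetings k s
  exact min_total_slack_eq meetings k s
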